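-- pv_equiv track=rewrite | github.com/purpose168/moltbot-skills | skills/visionik/ouracli/src/ouracli/chart_utils.py | create_hour_labels
-- ===== SOURCE A (Python) =====
-- def create_hour_labels(num_buckets: int, buckets_per_hour: int) -> list[str]:
--     """为图表X轴创建小时标签。
--
--     参数:
--         num_buckets: 总桶数
--         buckets_per_hour: 每小时的桶数（例如5分钟分辨率为12）
--
--     返回:
--         标签列表（小时标记和空字符串）
--     """
--     labels = []
--     for i in range(num_buckets):
--         if i % buckets_per_hour == 0:
--             hour = i // buckets_per_hour
--             labels.append(f"{hour:02d}")
--         else: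
--             labels.append("")
--     return labels
-- ===== SOURCE B (Python) =====
-- def create_hour_labels(num_buckets: int, buckets_per_hour: int) -> list[str]:
--     """Blank-fill then scatter: preallocate all-empty labels and walk only the
--     hour-marker positions with a stride of buckets_per_hour."""
--     labels = [""] * num_buckets
--     index = 0
--     while index < num_buckets:
--         labels[index] = f"{index // buckets_per_hour:02d}"
--         index += buckets_per_hour
--     return labels
-- ===== Notes on version B (the rewrite author's own statement) =====
-- stated objective: faster
-- what changed: Instead of iterating every bucket and testing i % buckets_per_hour per element, B preallocates an all-blank list in one step and strides only over the marker positions, writing index // buckets_per_hour at each; the per-bucket modulo branch disappears.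
-- outside the precondition, e.g. on create_hour_labels(5, -2): A returns ['00', '', '-1', '', '-2'], B raises IndexError
import Mathlib
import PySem

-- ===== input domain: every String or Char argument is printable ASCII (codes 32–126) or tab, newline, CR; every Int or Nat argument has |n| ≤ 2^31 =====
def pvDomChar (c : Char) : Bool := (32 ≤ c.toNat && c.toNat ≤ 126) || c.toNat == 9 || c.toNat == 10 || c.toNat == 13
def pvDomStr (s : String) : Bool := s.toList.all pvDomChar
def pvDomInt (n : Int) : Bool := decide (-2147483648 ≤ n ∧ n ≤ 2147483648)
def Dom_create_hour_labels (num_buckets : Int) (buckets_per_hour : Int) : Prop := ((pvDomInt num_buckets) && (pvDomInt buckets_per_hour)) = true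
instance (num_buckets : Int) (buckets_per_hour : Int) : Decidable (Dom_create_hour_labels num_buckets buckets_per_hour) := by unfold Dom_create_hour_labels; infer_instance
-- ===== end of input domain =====

-- B replaces A's per-bucket modulo branch by a blank prefill plus a stride walk over
-- the marker positions (objective: alternative decomposition; return-value equivalence only).

-- f"{hour:02d}" for the hours that occur here (exact for every Int: only 0..9 gain a pad)
def pvFmt02 (h : Int) : String :=
  if 0 ≤ h ∧ h < 10 then "0" ++ PySem.Int.toStr h else PySem.Int.toStr h

-- ===== PORT A =====
def create_hour_labels (num_buckets : Int) (buckets_per_hour : Int) : List String :=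
  (PySem.List.pyRange 0 num_buckets 1).foldl
    (fun labels i =>
      labels ++ [if PySem.Int.mod i buckets_per_hour = 0
                 then pvFmt02 (PySem.Int.floordiv i buckets_per_hour)
                 else ""])
    []

-- ===== PORT B =====
-- the while loop of Source B; the '0 < bph' conjunct is a totality guard only
-- (inside Pre_ it always holds when the loop body is reached)
def pvScatter (nb bph : Int) (idx : Int) (labels : List String) : List String :=
  if _h : 0 < bph ∧ idx < nb then
    pvScatter nb bph (idx + bph) (labels.set idx.toNat (pvFmt02 (PySem.Int.floordiv idx bph)))
  else labels
termination_by (nb - idx).toNat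
decreasing_by omega

def create_hour_labels_alt (num_buckets : Int) (buckets_per_hour : Int) : List String :=
  pvScatter num_buckets buckets_per_hour 0 (List.replicate num_buckets.toNat "")

-- ===== PRECONDITION & SPEC =====
-- Pre_ excludes buckets_per_hour ≤ 0 with num_buckets > 0: at 0 A raises ZeroDivisionError,
-- and for negative values A's markers (negative-hour labels placed by Python's
-- divisor-signed modulo) are a nonsensical corner on which B's stride walk itself raises.
def Pre_create_hour_labels (num_buckets : Int) (buckets_per_hour : Int) : Prop :=
  num_buckets ≤ 0 ∨ 0 < buckets_per_hour
instance (num_buckets : Int) (buckets_per_hour : Int) : Decidable (Pre_create_hour_labels num_buckets buckets_per_hour) := by unfold Pre_create_hour_labels; infer_instance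

def pvWitness_create_hour_labels : Int × Int := (25, 12)

def Spec_create_hour_labels (num_buckets : Int) (buckets_per_hour : Int) (out : List String) : Prop := out = create_hour_labels_alt num_buckets buckets_per_hour
instance (num_buckets : Int) (buckets_per_hour : Int) (out : List String) : Decidable (Spec_create_hour_labels num_buckets buckets_per_hour out) := by unfold Spec_create_hour_labels; infer_instance

-- ===== CLAIM (what is proved, stated in full; the proofs are below) =====
def Claim_equal_create_hour_labels : Prop := ∀ (num_buckets : Int) (buckets_per_hour : Int), Dom_create_hour_labels num_buckets buckets_per_hour → Pre_create_hour_labels num_buckets buckets_per_hour → Spec_create_hour_labels num_buckets buckets_per_hour (create_hour_labels num_buckets buckets_per_hour)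

-- ===== LEMMAS AND PROOFS =====

theorem pvScatter_length (nb bph idx : Int) (labels : List String) :
    (pvScatter nb bph idx labels).length = labels.length := by
  induction idx, labels using pvScatter.induct nb bph with
  | case1 idx labels h ih => rw [pvScatter, dif_pos h]; simpa using ih
  | case2 idx labels h => rw [pvScatter, dif_neg h]

theorem pvScatter_get (nb bph idx : Int) (labels : List String)
    (hb : 0 < bph) (hidx : 0 ≤ idx) (hlen : (labels.length : Int) ≤ nb)
    (j : Nat) (hj : j < labels.length) :
    (pvScatter nb bph idx labels)[j]? =
      some (if idx ≤ (j : Int) ∧ bph ∣ ((j : Int) - idx)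
            then pvFmt02 (PySem.Int.floordiv (j : Int) bph)
            else labels[j]) := by
  rw [pvScatter]
  by_cases h : 0 < bph ∧ idx < nb
  · rw [dif_pos h]
    rw [pvScatter_get nb bph (idx + bph)
          (labels.set idx.toNat (pvFmt02 (PySem.Int.floordiv idx bph)))
          hb (by omega) (by simpa using hlen) j (by simpa using hj)]
    by_cases hca : idx + bph ≤ (j : Int) ∧ bph ∣ ((j : Int) - (idx + bph))
    · rw [if_pos hca, if_pos ⟨by omega, by
        obtain ⟨k, hk⟩ := hca.2
        refine ⟨k + 1, ?_⟩
        have he : bph * (k + 1) = bph * k + bph := by ring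
        omega⟩]
    · by_cases heq : (j : Int) = idx
      · -- j is exactly the freshly written marker position
        have hji : idx.toNat = j := by omega
        rw [if_neg hca, if_pos ⟨by omega, by simp [heq]⟩]
        simp only [List.getElem_set, hji]
        simp [heq]
      · have hnot : ¬ (idx ≤ (j : Int) ∧ bph ∣ ((j : Int) - idx)) := by
          rintro ⟨h1, k, hk⟩
          have hgt : 0 < (j : Int) - idx := by omega
          have hk1 : 1 ≤ k := by
            by_contra hc
            have hk0 : k ≤ 0 := by omega
            have hle : bph * k ≤ 0 := by nlinarith
            omega
          have hmul : bph ≤ bph * k := by nlinarith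
          refine hca ⟨by omega, ⟨k - 1, ?_⟩⟩
          have he : bph * (k - 1) = bph * k - bph := by ring
          omega
        rw [if_neg hca, if_neg hnot]
        simp only [List.getElem_set]
        rw [if_neg (by omega : ¬ idx.toNat = j)]
  · rw [dif_neg h]
    have hge : nb ≤ idx := by
      by_contra hc
      exact h ⟨hb, by omega⟩
    have hnot : ¬ (idx ≤ (j : Int) ∧ bph ∣ ((j : Int) - idx)) := by
      rintro ⟨h1, _⟩
      omega
    rw [if_neg hnot, List.getElem?_eq_getElem hj]
termination_by (nb - idx).toNat
decreasing_by omega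

theorem portA_eq_map (nb bph : Int) :
    create_hour_labels nb bph =
      (PySem.List.pyRange 0 nb 1).map (fun i =>
        if PySem.Int.mod i bph = 0
        then pvFmt02 (PySem.Int.floordiv i bph) else "") := by
  rw [create_hour_labels, PySem.List.foldl_append_singleton_eq_map, List.nil_append]

-- ===== VERDICT (by name: the statement is the Claim_ definition above) =====
theorem create_hour_labels_spec : Claim_equal_create_hour_labels := by
  intro nb bph _ hpre
  unfold Spec_create_hour_labels create_hour_labels_alt
  by_cases hnb : nb ≤ 0
  · -- both sides are empty
    rw [portA_eq_map, PySem.List.pyRange_one_eq_nil hnb, List.map_nil, pvScatter,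
        dif_neg (by omega), Int.toNat_of_nonpos hnb, List.replicate_zero]
  · have hb : 0 < bph := by
      cases hpre with
      | inl h => omega
      | inr h => exact h
    rw [portA_eq_map, PySem.List.pyRange_one]
    apply List.ext_getElem?
    intro j
    rw [List.getElem?_map, List.getElem?_map]
    by_cases hjlt : j < (nb - 0).toNat
    · have hrepl : j < (List.replicate nb.toNat "").length := by simp; omega
      rw [List.getElem?_range hjlt,
          pvScatter_get nb bph 0 _ hb le_rfl (by simp; omega) j hrepl]
      simp only [Option.map_some, zero_add, Int.sub_zero]
      have hmod : PySem.Int.mod (j : Int) bph = 0 ↔ bph ∣ (j : Int) := by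
        rw [PySem.Int.mod_eq_emod_of_pos hb]
        constructor
        · exact fun h => Int.dvd_of_emod_eq_zero h
        · exact fun h => Int.emod_eq_zero_of_dvd h
      by_cases hc : bph ∣ (j : Int)
      · rw [if_pos (hmod.mpr hc), if_pos ⟨by omega, hc⟩]
      · rw [if_neg (fun h => hc (hmod.mp h)), if_neg (fun h => hc h.2),
            List.getElem_replicate]
    · rw [List.getElem?_eq_none (by simpa using hjlt),
          List.getElem?_eq_none (by rw [pvScatter_length]; simp; omega)]
      rfl
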